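-- pv_equiv track=rewrite | github.com/Ashiq-am/Path-of-Python | 3.Data Types/Arrays Set 1 and Set 2/Prefix Sum/Count triplets having product 0 from a given array/Count triplets having product 0 from a given array.py | cntTriplet
-- ===== SOURCE A (Python) =====
-- def cntTriplet(arr, N):
--     # preZero[i] stores count
--     # of 0 up to index i
--     preZero = [0] * N
--
--     # Traverse the array and
--     # Count 0s up to index i
--     for i in range(N):
--         if (arr[i] == 0):
--             preZero[i] = preZero[
--                              max(i - 1, 0)] + 1
--         else:
--             preZero[i] = preZero[
--                 max(i - 1, 0)]
--
--     # Stores count of triplet that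
--     # satisfy the given conditions
--     tripletCount = 0
--
--     # Traverse the given array
--     for i in range(N):
--         if (arr[i] == 0):
--
--             # Stores count of elements
--             # on the left side of arr[i]
--             X = i
--
--             # Stores count of elements
--             # on the right side of arr[i]
--             Y = N - i - 1
--
--             tripletCount += X * Y
--
--         else:
--
--             # Stores count of 0s on
--             # the left side of arr[i]
--             X = preZero[i]
--
--             # Stores count of 0s on
--             # the right side of arr[i]
--             Y = preZero[N - 1] - preZero[i]
--
--             tripletCount += X * Y
--
--     return tripletCount
-- ===== SOURCE B (Python) =====
-- def cntTriplet(arr, N):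
--     # One pass: zerosSeen = zeros so far; b = sum over nonzeros seen of zerosSeen
--     # at that moment. A zero at index i closes i*(N-1-i) (zero-middle triples)
--     # plus b (it is the right end of every (zero, nonzero, zero) triple so far).
--     zerosSeen = 0
--     b = 0
--     count = 0
--     for i in range(N):
--         if arr[i] == 0:
--             count += i * (N - 1 - i) + b
--             zerosSeen += 1
--         else:
--             b += zerosSeen
--     return count
-- ===== Notes on version B (the rewrite author's own statement) =====
-- stated objective: simpler
-- what changed: Replaced the prefix-zero auxiliary array and the second left*right pass by a single left-to-right pass maintaining two integer accumulators (zeros seen so far, and the running sum of zeros-seen at each nonzero), so no O(N) array is allocated and the input is scanned once.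
import Mathlib
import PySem

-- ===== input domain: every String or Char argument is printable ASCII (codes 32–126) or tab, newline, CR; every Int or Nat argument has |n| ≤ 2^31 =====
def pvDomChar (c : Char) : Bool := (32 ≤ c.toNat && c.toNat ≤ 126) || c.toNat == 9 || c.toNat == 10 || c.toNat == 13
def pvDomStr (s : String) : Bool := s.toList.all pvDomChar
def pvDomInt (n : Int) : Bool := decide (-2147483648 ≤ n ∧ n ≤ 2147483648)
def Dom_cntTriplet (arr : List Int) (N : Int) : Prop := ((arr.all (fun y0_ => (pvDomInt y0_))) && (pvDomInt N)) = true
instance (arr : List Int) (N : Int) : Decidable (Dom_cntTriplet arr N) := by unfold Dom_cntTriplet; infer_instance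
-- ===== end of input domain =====

-- B replaces A's prefix-zero array and second left*right pass by one pass with two
-- integer accumulators (zeros seen so far, running sum of zeros-seen at nonzeros): simpler, O(1) extra space.


-- ===== PORT A =====
def cntTriplet (arr : List Int) (N : Int) : Int :=
  -- preZero = [0]*N; for i in range(N): preZero[i] = preZero[max(i-1,0)] (+1 if arr[i]==0)
  let preZero := (PySem.List.pyRange 0 N 1).foldl (fun pz i =>
    if PySem.List.pyGetD arr i 0 = 0 then
      PySem.List.pySetD pz i (PySem.List.pyGetD pz (max (i-1) 0) 0 + 1)
    else
      PySem.List.pySetD pz i (PySem.List.pyGetD pz (max (i-1) 0) 0)) (List.replicate N.toNat 0)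
  -- tripletCount = 0; for i in range(N): add X*Y per the two branches
  (PySem.List.pyRange 0 N 1).foldl (fun tc i =>
    if PySem.List.pyGetD arr i 0 = 0 then tc + i * (N - i - 1)
    else tc + PySem.List.pyGetD preZero i 0 *
              (PySem.List.pyGetD preZero (N-1) 0 - PySem.List.pyGetD preZero i 0)) 0

-- ===== PORT B =====
-- state = (zerosSeen, b, count)
def cntTriplet_alt (arr : List Int) (N : Int) : Int :=
  ((PySem.List.pyRange 0 N 1).foldl (fun (s : Int × Int × Int) i =>
    if PySem.List.pyGetD arr i 0 = 0 then (s.1 + 1, s.2.1, s.2.2 + i * (N - 1 - i) + s.2.1)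
    else (s.1, s.2.1 + s.1, s.2.2)) (0, 0, 0)).2.2

-- ===== PRECONDITION & SPEC =====
-- Pre_: Python A raises IndexError (arr[i]) exactly when N > len(arr); excluded (B raises identically there).
def Pre_cntTriplet (arr : List Int) (N : Int) : Prop := N ≤ (arr.length : Int)
instance (arr : List Int) (N : Int) : Decidable (Pre_cntTriplet arr N) := by unfold Pre_cntTriplet; infer_instance
def pvWitness_cntTriplet : List Int × Int := ([0, 5, 0, -3, 0], 5)

def Spec_cntTriplet (arr : List Int) (N : Int) (out : Int) : Prop := out = cntTriplet_alt arr N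
instance (arr : List Int) (N : Int) (out : Int) : Decidable (Spec_cntTriplet arr N out) := by unfold Spec_cntTriplet; infer_instance

-- ===== CLAIM (what is proved, stated in full; the proofs are below) =====
def Claim_equal_cntTriplet : Prop := ∀ (arr : List Int) (N : Int), Dom_cntTriplet arr N → Pre_cntTriplet arr N → Spec_cntTriplet arr N (cntTriplet arr N)

-- ===== LEMMAS AND PROOFS =====

-- Zf arr k = number of zeros among the first k elements of arr
def Zf (arr : List Int) (k : Nat) : Int := ((arr.take k).countP (fun x => decide (x = 0)) : Int)

-- the preZero array after the first k slots have been written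
def pzPart (arr : List Int) (n k : Nat) : List Int :=
  (List.range n).map (fun j => if j < k then Zf arr (j+1) else 0)

theorem Zf_succ (arr : List Int) (k : Nat) (hk : k < arr.length) :
    Zf arr (k+1) = Zf arr k + (if arr.getD k 0 = 0 then 1 else 0) := by
  unfold Zf
  have hcp : List.countP (fun x => decide (x = 0)) (arr.take (k+1))
      = List.countP (fun x => decide (x = 0)) (arr.take k) + (if arr[k] = 0 then 1 else 0) := by
    rw [List.take_add_one, List.getElem?_eq_getElem hk, List.countP_append]
    by_cases h : arr[k] = 0 <;> simp [h]
  rw [List.getD_eq_getElem _ _ hk, hcp]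
  split_ifs <;> push_cast <;> ring

theorem getD_pzPart (arr : List Int) (n k j : Nat) (hj : j < n) :
    (pzPart arr n k).getD j 0 = if j < k then Zf arr (j+1) else 0 := by
  unfold pzPart
  rw [List.getD_eq_getElem _ _ (by simpa using hj)]
  simp

theorem pzPart_zero (arr : List Int) (n : Nat) :
    pzPart arr n 0 = List.replicate n 0 := by
  simp [pzPart, List.map_const']

theorem set_pzPart (arr : List Int) (n k : Nat) (hk : k < n) :
    (pzPart arr n k).set k (Zf arr (k+1)) = pzPart arr n (k+1) := by
  apply List.ext_getElem
  · simp [pzPart]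
  · intro j hj hj'
    rw [List.getElem_set]
    by_cases h : k = j <;> simp [pzPart, h] <;> omega

-- A's first loop, started at index i with the first i slots already written, fills preZero
theorem loop1_eq (arr : List Int) (N : Int) (hN : N ≤ (arr.length : Int)) :
    ∀ (i : Int), 0 ≤ i → i ≤ N →
      (PySem.List.pyRange i N 1).foldl (fun pz j =>
        if PySem.List.pyGetD arr j 0 = 0 then
          PySem.List.pySetD pz j (PySem.List.pyGetD pz (max (j-1) 0) 0 + 1)
        else
          PySem.List.pySetD pz j (PySem.List.pyGetD pz (max (j-1) 0) 0))
        (pzPart arr N.toNat i.toNat)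
      = pzPart arr N.toNat N.toNat := by
  intro i h0 hiN
  induction hi : (N - i).toNat generalizing i with
  | zero =>
      rw [PySem.List.pyRange_one_eq_nil (by omega)]
      have : i = N := by omega
      simp [this]
  | succ m ih =>
      have hlt : i < N := by omega
      have hk : i.toNat < N.toNat := by omega
      have hklen : i.toNat < arr.length := by omega
      have hread : PySem.List.pyGetD (pzPart arr N.toNat i.toNat) (max (i-1) 0) 0 = Zf arr i.toNat := by
        rw [PySem.List.pyGetD_of_nonneg _ _ (by omega : (0:Int) ≤ max (i-1) 0)]
        rcases Nat.eq_zero_or_pos i.toNat with h0' | hpos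
        · rw [show (max (i-1) 0).toNat = 0 by omega, getD_pzPart _ _ _ _ (by omega)]
          simp [h0', show Zf arr 0 = 0 by simp [Zf]]
        · rw [show (max (i-1) 0).toNat = i.toNat - 1 by omega, getD_pzPart _ _ _ _ (by omega)]
          rw [if_pos (by omega : i.toNat - 1 < i.toNat), show i.toNat - 1 + 1 = i.toNat by omega]
      have hgetarr : PySem.List.pyGetD arr i 0 = arr.getD i.toNat 0 :=
        PySem.List.pyGetD_of_nonneg arr 0 h0
      have hset : ∀ v : Int, PySem.List.pySetD (pzPart arr N.toNat i.toNat) i v =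
          (pzPart arr N.toNat i.toNat).set i.toNat v :=
        fun v => PySem.List.pySetD_of_nonneg _ v h0
      have htn : (i+1).toNat = i.toNat + 1 := by omega
      rw [PySem.List.pyRange_one_cons hlt, List.foldl_cons]
      by_cases hz : PySem.List.pyGetD arr i 0 = 0
      · rw [if_pos hz, hread, hset]
        have hzz : arr.getD i.toNat 0 = 0 := by rw [← hgetarr]; exact hz
        have : Zf arr i.toNat + 1 = Zf arr (i.toNat + 1) := by
          rw [Zf_succ arr i.toNat hklen, hzz]; simp
        rw [this, set_pzPart arr N.toNat i.toNat hk, ← htn]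
        exact ih (i+1) (by omega) (by omega) (by omega)
      · rw [if_neg hz, hread, hset]
        have hzz : ¬ arr.getD i.toNat 0 = 0 := by rw [← hgetarr]; exact hz
        have : Zf arr i.toNat = Zf arr (i.toNat + 1) := by
          rw [Zf_succ arr i.toNat hklen, if_neg hzz]; ring
        rw [this, set_pzPart arr N.toNat i.toNat hk, ← htn]
        exact ih (i+1) (by omega) (by omega) (by omega)

-- the main invariant: B's loop from index i = c + (A's remaining second-loop sum) + b * (zeros still to come)
theorem main_inv (arr : List Int) (N : Int) (hN0 : 0 ≤ N) (hN : N ≤ (arr.length : Int)) :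
    ∀ (i z b c tc : Int), 0 ≤ i → i ≤ N → z = Zf arr i.toNat →
      ((PySem.List.pyRange i N 1).foldl (fun (s : Int × Int × Int) j =>
        if PySem.List.pyGetD arr j 0 = 0 then (s.1 + 1, s.2.1, s.2.2 + j * (N - 1 - j) + s.2.1)
        else (s.1, s.2.1 + s.1, s.2.2)) (z, b, c)).2.2 =
      c + ((PySem.List.pyRange i N 1).foldl (fun tc j =>
        if PySem.List.pyGetD arr j 0 = 0 then tc + j * (N - j - 1)
        else tc + PySem.List.pyGetD (pzPart arr N.toNat N.toNat) j 0 *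
                  (PySem.List.pyGetD (pzPart arr N.toNat N.toNat) (N-1) 0 -
                   PySem.List.pyGetD (pzPart arr N.toNat N.toNat) j 0)) tc - tc)
        + b * (Zf arr N.toNat - z) := by
  intro i z b c tc h0 hiN hz
  induction hm : (N - i).toNat generalizing i z b c tc with
  | zero =>
      have : i = N := by omega
      subst this
      rw [PySem.List.pyRange_one_eq_nil (by omega), List.foldl_nil, List.foldl_nil, hz]
      ring
  | succ m ih =>
      have hlt : i < N := by omega
      have hk : i.toNat < N.toNat := by omega
      have hklen : i.toNat < arr.length := by omega
      have htn : (i+1).toNat = i.toNat + 1 := by omega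
      have hgetarr : PySem.List.pyGetD arr i 0 = arr.getD i.toNat 0 :=
        PySem.List.pyGetD_of_nonneg arr 0 h0
      rw [PySem.List.pyRange_one_cons hlt, List.foldl_cons, List.foldl_cons]
      by_cases hzz : PySem.List.pyGetD arr i 0 = 0
      · rw [if_pos hzz, if_pos hzz]
        have hZ1 : z + 1 = Zf arr (i+1).toNat := by
          rw [htn, Zf_succ arr i.toNat hklen, ← hgetarr, if_pos hzz, hz]
        rw [ih (i+1) (z+1) b (c + i * (N - 1 - i) + b) (tc + i * (N - i - 1)) (by omega) (by omega) hZ1 (by omega)]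
        ring
      · rw [if_neg hzz, if_neg hzz]
        have hZ1 : z = Zf arr (i+1).toNat := by
          rw [htn, Zf_succ arr i.toNat hklen, ← hgetarr, if_neg hzz, hz]; ring
        have hprei : PySem.List.pyGetD (pzPart arr N.toNat N.toNat) i 0 = Zf arr (i.toNat + 1) := by
          rw [PySem.List.pyGetD_of_nonneg _ 0 h0, getD_pzPart _ _ _ _ hk, if_pos (by omega)]
        have hpreN : PySem.List.pyGetD (pzPart arr N.toNat N.toNat) (N-1) 0 = Zf arr N.toNat := by
          rw [PySem.List.pyGetD_of_nonneg _ 0 (by omega : (0:Int) ≤ N - 1),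
            getD_pzPart _ _ _ _ (by omega), if_pos (by omega)]
          congr 1
          omega
        have hback : Zf arr (i.toNat + 1) = z := by rw [hZ1, htn]
        rw [ih (i+1) z (b + z) c
          (tc + PySem.List.pyGetD (pzPart arr N.toNat N.toNat) i 0 *
            (PySem.List.pyGetD (pzPart arr N.toNat N.toNat) (N-1) 0 -
             PySem.List.pyGetD (pzPart arr N.toNat N.toNat) i 0))
          (by omega) (by omega) hZ1 (by omega)]
        rw [hprei, hpreN, hback]
        ring

-- ===== VERDICT (by name: the statement is the Claim_ definition above) =====
theorem cntTriplet_spec : Claim_equal_cntTriplet := by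
  intro arr N _ hpre
  unfold Spec_cntTriplet cntTriplet cntTriplet_alt
  by_cases hN0 : 0 ≤ N
  · have hz0 : Zf arr (0:Int).toNat = 0 := by simp [Zf]
    rw [show List.replicate N.toNat (0:Int) = pzPart arr N.toNat (0:Int).toNat by
      rw [show (0:Int).toNat = 0 from rfl, pzPart_zero]]
    rw [loop1_eq arr N hpre 0 (le_refl 0) hN0]
    rw [main_inv arr N hN0 hpre 0 0 0 0 0 (le_refl 0) hN0 hz0.symm]
    ring
  · rw [PySem.List.pyRange_one_eq_nil (by omega)]
    simp
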